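-- pv_equiv track=rewrite | github.com/magicmayonaise/Connectomics | src/cx_connectome/ci/signed.py | _resolve_annotation
-- ===== SOURCE A (Python) =====
-- from typing import Iterable, Mapping, MutableMapping, Optional, Sequence
--
-- _EXCITATORY_MARKERS = {
--     "ach",
--     "acetylcholine",
--     "cholinergic",
-- }
--
-- _INHIBITORY_MARKERS = {
--     "gaba",
--     "gabaergic",
--     "gamma-aminobutyric acid",
-- }
--
-- _UNKNOWN_MARKERS = {
--     "glu",
--     "glutamate",
--     "glutamatergic",
-- }
--
-- def _resolve_annotation(label: str) -> Optional[str]: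
--     """Resolve a normalised annotation into ``"E"``, ``"I"`` or ``None``."""
--
--     if not label:
--         return None
--     if label in _EXCITATORY_MARKERS:
--         return "E"
--     if label in _INHIBITORY_MARKERS:
--         return "I"
--     if label in _UNKNOWN_MARKERS:
--         return None
--     # Fuzzy matching: handle partial matches such as "strongly cholinergic".
--     if any(marker in label for marker in _EXCITATORY_MARKERS):
--         return "E"
--     if any(marker in label for marker in _INHIBITORY_MARKERS):
--         return "I"
--     if any(marker in label for marker in _UNKNOWN_MARKERS):
--         return None
--     return None
-- ===== SOURCE B (Python) =====
-- from typing import Optional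
--
-- # One ordered marker->result table replacing A's exact-membership phase plus
-- # three separate any(...) scans: the first substring hit decides the class.
-- _MARKER_TABLE = [
--     ("ach", "E"),
--     ("acetylcholine", "E"),
--     ("cholinergic", "E"),
--     ("gaba", "I"),
--     ("gabaergic", "I"),
--     ("gamma-aminobutyric acid", "I"),
--     ("glu", None),
--     ("glutamate", None),
--     ("glutamatergic", None),
-- ]
--
-- def _resolve_annotation(label: str) -> Optional[str]:
--     """Resolve a normalised annotation into ``"E"``, ``"I"`` or ``None``."""
--     for marker, result in _MARKER_TABLE:
--         if marker in label:
--             return result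
--     return None
-- ===== Notes on version B (the rewrite author's own statement) =====
-- stated objective: simpler
-- what changed: Replaced A's exact-membership phase plus three separate any(...) fuzzy scans with a single loop over one ordered (marker, result) table returning the first substring hit; the exact phase is redundant because no marker of one class is a substring of a marker of another.
import Mathlib
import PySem

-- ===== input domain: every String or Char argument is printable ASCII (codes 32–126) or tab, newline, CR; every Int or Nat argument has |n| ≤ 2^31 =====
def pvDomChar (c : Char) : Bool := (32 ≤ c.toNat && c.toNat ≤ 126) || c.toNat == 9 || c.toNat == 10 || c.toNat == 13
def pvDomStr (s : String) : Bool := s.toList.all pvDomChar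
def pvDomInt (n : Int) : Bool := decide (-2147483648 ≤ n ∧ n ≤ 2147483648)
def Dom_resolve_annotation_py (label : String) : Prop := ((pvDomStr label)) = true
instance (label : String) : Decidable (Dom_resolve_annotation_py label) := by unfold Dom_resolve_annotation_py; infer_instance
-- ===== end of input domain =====

-- B replaces A's exact-membership phase and three any(...) scans by one ordered
-- (marker, result) table scanned once for the first substring hit (objective: simpler).

-- ===== PORT A =====
def excitatoryMarkers : PySem.Set String :=
  PySem.Set.ofList ["ach", "acetylcholine", "cholinergic"]
def inhibitoryMarkers : PySem.Set String :=
  PySem.Set.ofList ["gaba", "gabaergic", "gamma-aminobutyric acid"]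
def unknownMarkers : PySem.Set String :=
  PySem.Set.ofList ["glu", "glutamate", "glutamatergic"]

def resolve_annotation_py (label : String) : Option String :=
  if label = "" then none
  else if PySem.Set.contains excitatoryMarkers label then some "E"
  else if PySem.Set.contains inhibitoryMarkers label then some "I"
  else if PySem.Set.contains unknownMarkers label then none
  -- Fuzzy matching: handle partial matches such as "strongly cholinergic".
  else if excitatoryMarkers.any (fun marker => PySem.Str.isIn marker label) then some "E"
  else if inhibitoryMarkers.any (fun marker => PySem.Str.isIn marker label) then some "I"
  else if unknownMarkers.any (fun marker => PySem.Str.isIn marker label) then none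
  else none

-- ===== PORT B =====
def markerTable : List (String × Option String) :=
  [("ach", some "E"), ("acetylcholine", some "E"), ("cholinergic", some "E"),
   ("gaba", some "I"), ("gabaergic", some "I"), ("gamma-aminobutyric acid", some "I"),
   ("glu", none), ("glutamate", none), ("glutamatergic", none)]

def resolveScan (label : String) : List (String × Option String) → Option String
  | [] => none
  | (marker, result) :: rest =>
      if PySem.Str.isIn marker label then result else resolveScan label rest

def resolve_annotation_py_alt (label : String) : Option String :=
  resolveScan label markerTable

-- ===== PRECONDITION & SPEC =====
def Spec_resolve_annotation_py (label : String) (out : Option String) : Prop := out = resolve_annotation_py_alt label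
instance (label : String) (out : Option String) : Decidable (Spec_resolve_annotation_py label out) := by unfold Spec_resolve_annotation_py; infer_instance

-- ===== CLAIM (what is proved, stated in full; the proofs are below) =====
def Claim_equal_resolve_annotation_py : Prop := ∀ (label : String), Dom_resolve_annotation_py label → Spec_resolve_annotation_py label (resolve_annotation_py label)

-- ===== LEMMAS AND PROOFS =====

-- Three same-result substring tests in a row collapse to one disjunction.
theorem ite_or3 {α : Type} (a b c : Bool) (r rest : α) :
    (if a then r else if b then r else if c then r else rest)
      = if (a || (b || c)) then r else rest := by
  cases a <;> cases b <;> cases c <;> simp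

-- A label that equals one marker exactly: both programs are closed terms; decide.
theorem eq_case (lit : String) (h : resolve_annotation_py lit = resolve_annotation_py_alt lit)
    {label : String} (he : label = lit) :
    resolve_annotation_py label = resolve_annotation_py_alt label := he ▸ h

-- ===== VERDICT (by name: the statement is the Claim_ definition above) =====
theorem resolve_annotation_py_spec : Claim_equal_resolve_annotation_py := by
  intro label _
  unfold Spec_resolve_annotation_py
  by_cases h0 : label = ""
  · exact eq_case "" (by decide) h0
  · by_cases h1 : label = "ach";                      · exact eq_case _ (by decide) h1
    by_cases h2 : label = "acetylcholine";            · exact eq_case _ (by decide) h2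
    by_cases h3 : label = "cholinergic";              · exact eq_case _ (by decide) h3
    by_cases h4 : label = "gaba";                     · exact eq_case _ (by decide) h4
    by_cases h5 : label = "gabaergic";                · exact eq_case _ (by decide) h5
    by_cases h6 : label = "gamma-aminobutyric acid";  · exact eq_case _ (by decide) h6
    by_cases h7 : label = "glu";                      · exact eq_case _ (by decide) h7
    by_cases h8 : label = "glutamate";                · exact eq_case _ (by decide) h8
    by_cases h9 : label = "glutamatergic";            · exact eq_case _ (by decide) h9
    -- generic case: the exact-membership phase never fires; both sides are the fuzzy scan
    have hcE : PySem.Set.contains excitatoryMarkers label = false := by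
      rw [Bool.eq_false_iff]; intro hc
      have hm := (PySem.Set.contains_iff excitatoryMarkers label).mp hc
      rw [show excitatoryMarkers = ["ach", "acetylcholine", "cholinergic"] from by decide] at hm
      simp only [List.mem_cons, List.not_mem_nil, or_false] at hm
      rcases hm with h | h | h <;> simp_all
    have hcI : PySem.Set.contains inhibitoryMarkers label = false := by
      rw [Bool.eq_false_iff]; intro hc
      have hm := (PySem.Set.contains_iff inhibitoryMarkers label).mp hc
      rw [show inhibitoryMarkers = ["gaba", "gabaergic", "gamma-aminobutyric acid"] from by decide] at hm
      simp only [List.mem_cons, List.not_mem_nil, or_false] at hm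
      rcases hm with h | h | h <;> simp_all
    have hcU : PySem.Set.contains unknownMarkers label = false := by
      rw [Bool.eq_false_iff]; intro hc
      have hm := (PySem.Set.contains_iff unknownMarkers label).mp hc
      rw [show unknownMarkers = ["glu", "glutamate", "glutamatergic"] from by decide] at hm
      simp only [List.mem_cons, List.not_mem_nil, or_false] at hm
      rcases hm with h | h | h <;> simp_all
    unfold resolve_annotation_py resolve_annotation_py_alt
    rw [if_neg h0]
    simp only [hcE, hcI, hcU, Bool.false_eq_true, if_false]
    simp only [show excitatoryMarkers = ["ach", "acetylcholine", "cholinergic"] from by decide,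
      show inhibitoryMarkers = ["gaba", "gabaergic", "gamma-aminobutyric acid"] from by decide,
      show unknownMarkers = ["glu", "glutamate", "glutamatergic"] from by decide,
      markerTable, resolveScan, List.any_cons, List.any_nil, Bool.or_false]
    conv_rhs => rw [ite_or3, ite_or3, ite_or3]
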